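-- pv_equiv track=rewrite | github.com/vppuzakov/aoc | adventofcode/day15/first.py | increase_field
-- ===== SOURCE A (Python) =====
-- def increase_field(field: list[list[int]], size: int) -> list[list[int]]:
--     large_field = []
--     n = len(field)
--     for increase_i in range(size):
--         for i in range(n):
--             row = []
--             for increase_j in range(size):
--                 for j in range(n):
--                     value = (field[i][j] + increase_i + increase_j) % 9
--                     row.append(value or 9)
--
--             large_field.append(row)
--
--     return large_field
-- ===== SOURCE B (Python) =====
-- def increase_field(field: list[list[int]], size: int) -> list[list[int]]:
--     n = len(field)
--
--     def inc_row(row):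
--         return [1 if v == 9 else v + 1 for v in row]
--
--     def inc_tile(tile):
--         return [inc_row(r) for r in tile]
--
--     # normalized n-by-n base tile: wrap every value into 1..9
--     base = [[(v % 9) or 9 for v in row[:n]] for row in field]
--
--     # top row of tiles: each tile is the previous one incremented with wrap
--     tiles = [base]
--     for _ in range(size - 1):
--         tiles.append(inc_tile(tiles[-1]))
--
--     # stitch the top band of tiles horizontally
--     band = [[] for _ in field]
--     for tile in tiles:
--         band = [b + r for b, r in zip(band, tile)]
--
--     # each following band is the band above it, incremented with wrap
--     out = []
--     for _ in range(size):
--         out.extend(band)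
--         band = inc_tile(band)
--     return out
-- ===== Notes on version B (the rewrite author's own statement) =====
-- stated objective: alternative
-- what changed: Instead of recomputing ((field[i][j]+di+dj) % 9 or 9) per output cell in four nested loops, B normalizes one n-by-n base tile once and then propagates: each tile in the top band is the previous tile incremented with wrap (9->1), and each following band is the band above incremented, stitched with list concatenation.
import Mathlib
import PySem

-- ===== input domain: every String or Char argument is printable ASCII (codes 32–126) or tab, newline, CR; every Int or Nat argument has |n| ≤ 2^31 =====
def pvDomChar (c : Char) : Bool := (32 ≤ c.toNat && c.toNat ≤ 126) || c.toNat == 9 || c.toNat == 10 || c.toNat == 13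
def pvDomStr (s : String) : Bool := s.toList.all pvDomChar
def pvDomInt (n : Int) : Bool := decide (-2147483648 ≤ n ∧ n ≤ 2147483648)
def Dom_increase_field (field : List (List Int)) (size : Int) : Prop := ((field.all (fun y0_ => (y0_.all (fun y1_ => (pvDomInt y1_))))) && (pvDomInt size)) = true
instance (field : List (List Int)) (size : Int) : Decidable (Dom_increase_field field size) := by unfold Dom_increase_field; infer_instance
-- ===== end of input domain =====

-- B replaces the per-cell ((v+di+dj) % 9 or 9) formula of A by normalizing one base tile
-- and propagating wrap-increments tile-to-tile and band-to-band (alternative decomposition).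

-- ===== PORT A =====
def increase_field (field : List (List Int)) (size : Int) : List (List Int) :=
  let n : Int := PySem.List.len field
  (PySem.List.pyRange 0 size 1).foldl (fun large_field increase_i =>
    (PySem.List.pyRange 0 n 1).foldl (fun large_field i =>
      let row : List Int :=
        (PySem.List.pyRange 0 size 1).foldl (fun row increase_j =>
          (PySem.List.pyRange 0 n 1).foldl (fun row j =>
            let value := PySem.Int.mod (PySem.List.pyGetD (PySem.List.pyGetD field i []) j 0 + increase_i + increase_j) 9
            row ++ [if value = 0 then 9 else value]) row) []
      large_field ++ [row]) large_field) []

-- ===== PORT B =====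
def pvIncRow (row : List Int) : List Int := row.map (fun v => if v = 9 then 1 else v + 1)

def pvIncTile (tile : List (List Int)) : List (List Int) := tile.map pvIncRow

def increase_field_alt (field : List (List Int)) (size : Int) : List (List Int) :=
  let n : Int := PySem.List.len field
  let base : List (List Int) := field.map (fun row =>
    (PySem.List.slice row none (some n)).map (fun v =>
      let m := PySem.Int.mod v 9
      if m = 0 then 9 else m))
  let tiles : List (List (List Int)) :=
    (PySem.List.pyRange 0 (size - 1) 1).foldl
      (fun ts _ => ts ++ [pvIncTile (ts.getLast?.getD [])]) [base]
  let band : List (List Int) :=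
    tiles.foldl (fun band tile => List.zipWith (fun b r => b ++ r) band tile)
      (field.map (fun _ => ([] : List Int)))
  ((PySem.List.pyRange 0 size 1).foldl
      (fun (p : List (List Int) × List (List Int)) _ => (p.1 ++ p.2, pvIncTile p.2))
      (([] : List (List Int)), band)).1

-- ===== PRECONDITION & SPEC =====
-- Pre_ excludes only inputs on which A raises IndexError: when size ≥ 1, A indexes every row
-- at positions 0..len(field)-1, so rows shorter than len(field) make A raise.
def Pre_increase_field (field : List (List Int)) (size : Int) : Prop :=
  size ≤ 0 ∨ ∀ row ∈ field, field.length ≤ row.length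
instance (field : List (List Int)) (size : Int) : Decidable (Pre_increase_field field size) := by
  unfold Pre_increase_field; infer_instance

def pvWitness_increase_field : List (List Int) × Int := ([[1, 2], [3, 4]], 2)

def Spec_increase_field (field : List (List Int)) (size : Int) (out : List (List Int)) : Prop := out = increase_field_alt field size
instance (field : List (List Int)) (size : Int) (out : List (List Int)) : Decidable (Spec_increase_field field size out) := by unfold Spec_increase_field; infer_instance

-- ===== CLAIM (what is proved, stated in full; the proofs are below) =====
def Claim_equal_increase_field : Prop := ∀ (field : List (List Int)) (size : Int), Dom_increase_field field size → Pre_increase_field field size → Spec_increase_field field size (increase_field field size)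

-- ===== LEMMAS AND PROOFS =====

-- the value of one output cell: wrap v+k into 1..9
def gfun (v k : Int) : Int := if (v + k) % 9 = 0 then 9 else (v + k) % 9

-- one n-wide segment of an output row
def seg (r : List Int) (nn : Nat) (k : Int) : List Int := (r.take nn).map (fun v => gfun v k)

-- one full output row: size segments
def brow (r : List Int) (nn s : Nat) (ii : Int) : List Int :=
  (List.range s).flatMap (fun t : Nat => seg r nn (ii + (t : Int)))

-- the common reference shape of both outputs
def model (field : List (List Int)) (s : Nat) : List (List Int) :=
  (List.range s).flatMap (fun ii : Nat => field.map (fun r => brow r field.length s (ii : Int)))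

lemma foldl_congr2 {α β : Type} {f g : β → α → β} (h : ∀ b a, f b a = g b a)
    (l : List α) (init : β) : l.foldl f init = l.foldl g init := by
  have : f = g := funext fun b => funext fun a => h b a
  rw [this]

lemma cell_eq (v w : Int) :
    (if PySem.Int.mod (v + w) 9 = 0 then 9 else PySem.Int.mod (v + w) 9) = gfun v w := by
  rw [PySem.Int.mod_eq_emod_of_pos (by norm_num)]; rfl

lemma gfun_succ (v k : Int) :
    (if gfun v k = 9 then 1 else gfun v k + 1) = gfun v (k + 1) := by
  simp only [gfun]
  have h1 : 0 ≤ (v + k) % 9 := Int.emod_nonneg _ (by norm_num)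
  have h2 : (v + k) % 9 < 9 := Int.emod_lt_of_pos _ (by norm_num)
  have h3 : (v + (k + 1)) % 9 = ((v + k) % 9 + 1) % 9 := by omega
  split_ifs <;> omega

lemma incRow_seg (r : List Int) (nn : Nat) (k : Int) :
    pvIncRow (seg r nn k) = seg r nn (k + 1) := by
  simp only [pvIncRow, seg, List.map_map]
  exact List.map_congr_left (fun v _ => gfun_succ v k)

lemma incRow_brow (r : List Int) (nn s : Nat) (ii : Int) :
    pvIncRow (brow r nn s ii) = brow r nn s (ii + 1) := by
  simp only [pvIncRow, brow, List.map_flatMap]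
  refine List.flatMap_congr ?_
  intro t _
  have h := incRow_seg r nn (ii + (t : Int))
  simp only [pvIncRow] at h
  rw [h]
  congr 1
  ring

lemma foldl_range_getD {α β : Type} (xs : List α) (d : α) (nn : Nat) (h : nn ≤ xs.length)
    (f : β → α → β) (init : β) :
    (List.range nn).foldl (fun acc k => f acc (xs.getD k d)) init = (xs.take nn).foldl f init := by
  induction nn with
  | zero => simp
  | succ m ih =>
    have hm : m < xs.length := by omega
    rw [List.range_succ, List.foldl_append, ih (by omega)]
    have ht : xs.take (m + 1) = xs.take m ++ [xs[m]] := by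
      rw [List.take_add_one]
      simp [List.getElem?_eq_getElem hm]
    rw [ht, List.foldl_append]
    simp [List.getD_eq_getElem?_getD, List.getElem?_eq_getElem hm]

-- A's inner two loops build one output row
lemma rowA_eq (r : List Int) (nn : Nat) (h : nn ≤ r.length) (size ii : Int) :
    (PySem.List.pyRange 0 size 1).foldl (fun row increase_j =>
        (PySem.List.pyRange 0 (nn : Int) 1).foldl (fun row j =>
          let value := PySem.Int.mod (PySem.List.pyGetD r j 0 + ii + increase_j) 9
          row ++ [if value = 0 then 9 else value]) row) []
      = brow r nn size.toNat ii := by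
  have hj : ∀ (acc : List Int) (w : Int),
      (PySem.List.pyRange 0 (nn : Int) 1).foldl (fun row j =>
        row ++ [if PySem.Int.mod (PySem.List.pyGetD r j 0 + w) 9 = 0 then 9
                else PySem.Int.mod (PySem.List.pyGetD r j 0 + w) 9]) acc
      = acc ++ seg r nn w := by
    intro acc w
    rw [PySem.List.pyRange_one, List.foldl_map]
    simp only [sub_zero, Int.toNat_natCast, zero_add, PySem.List.pyGetD_natCast]
    rw [foldl_range_getD r 0 nn h
      (fun row v => row ++ [if PySem.Int.mod (v + w) 9 = 0 then 9 else PySem.Int.mod (v + w) 9]) acc]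
    rw [PySem.List.foldl_append_singleton_eq_map]
    congr 1
    exact List.map_congr_left (fun v _ => cell_eq v w)
  calc (PySem.List.pyRange 0 size 1).foldl (fun row increase_j =>
        (PySem.List.pyRange 0 (nn : Int) 1).foldl (fun row j =>
          let value := PySem.Int.mod (PySem.List.pyGetD r j 0 + ii + increase_j) 9
          row ++ [if value = 0 then 9 else value]) row) []
      = (PySem.List.pyRange 0 size 1).foldl (fun row increase_j =>
          row ++ seg r nn (ii + increase_j)) [] := by
        refine foldl_congr2 (fun acc ij => ?_) _ _
        have := hj acc (ii + ij)
        simp only [← add_assoc] at this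
        exact this
    _ = brow r nn size.toNat ii := by
        rw [PySem.List.foldl_append_eq_flatMap, List.nil_append,
          PySem.List.pyRange_one, List.flatMap_map, brow.eq_def]
        simp only [sub_zero, zero_add]

-- A equals the model when every row is long enough
lemma A_eq_model (field : List (List Int)) (size : Int)
    (h : ∀ row, row ∈ field → field.length ≤ row.length) :
    increase_field field size = model field size.toNat := by
  unfold increase_field
  simp only [PySem.List.len_eq]
  have hbody : ∀ (acc : List (List Int)) (ii : Int),
      (PySem.List.pyRange 0 (field.length : Int) 1).foldl (fun LF i =>
        LF ++ [(PySem.List.pyRange 0 size 1).foldl (fun row increase_j =>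
          (PySem.List.pyRange 0 (field.length : Int) 1).foldl (fun row j =>
            let value := PySem.Int.mod (PySem.List.pyGetD (PySem.List.pyGetD field i []) j 0 + ii + increase_j) 9
            row ++ [if value = 0 then 9 else value]) row) []]) acc
      = acc ++ field.map (fun r => brow r field.length size.toNat ii) := by
    intro acc ii
    have hstep1 : (PySem.List.pyRange 0 (field.length : Int) 1).foldl (fun LF i =>
        LF ++ [(PySem.List.pyRange 0 size 1).foldl (fun row increase_j =>
          (PySem.List.pyRange 0 (field.length : Int) 1).foldl (fun row j =>
            let value := PySem.Int.mod (PySem.List.pyGetD (PySem.List.pyGetD field i []) j 0 + ii + increase_j) 9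
            row ++ [if value = 0 then 9 else value]) row) []]) acc
        = (PySem.List.pyRange 0 (field.length : Int) 1).foldl (fun LF i =>
            LF ++ [brow (PySem.List.pyGetD field i []) field.length size.toNat ii]) acc := by
      refine PySem.List.foldl_congr_mem _ _ _ _ (fun LF i hi => ?_)
      rw [PySem.List.mem_pyRange_one] at hi
      have hmem : PySem.List.pyGetD field i [] ∈ field :=
        PySem.List.pyGetD_mem field [] (by unfold PySem.Raise.InRange; omega)
      rw [rowA_eq (PySem.List.pyGetD field i []) field.length (h _ hmem) size ii]
    rw [hstep1, PySem.List.pyRange_one 0 (field.length : Int), List.foldl_map]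
    simp only [sub_zero, Int.toNat_natCast, zero_add, PySem.List.pyGetD_natCast]
    rw [foldl_range_getD field [] field.length le_rfl
      (fun LF rr => LF ++ [brow rr field.length size.toNat ii]) acc]
    rw [List.take_length, PySem.List.foldl_append_singleton_eq_map]
  rw [foldl_congr2 hbody, PySem.List.foldl_append_eq_flatMap, List.nil_append,
    PySem.List.pyRange_one, List.flatMap_map, model.eq_def]
  simp only [sub_zero, zero_add]

-- B's base tile
lemma base_eq (field : List (List Int)) :
    (field.map (fun row =>
      (PySem.List.slice row none (some (field.length : Int))).map (fun v =>
        if PySem.Int.mod v 9 = 0 then 9 else PySem.Int.mod v 9)))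
      = field.map (fun r => seg r field.length 0) := by
  refine List.map_congr_left (fun r _ => ?_)
  rw [PySem.List.slice_to_natCast]
  refine List.map_congr_left (fun v _ => ?_)
  have := cell_eq v 0
  simpa using this

lemma incTile_tile (field : List (List Int)) (nn : Nat) (k : Int) :
    pvIncTile (field.map (fun r => seg r nn k)) = field.map (fun r => seg r nn (k + 1)) := by
  simp only [pvIncTile, List.map_map]
  exact List.map_congr_left (fun r _ => incRow_seg r nn k)

lemma incTile_band (field : List (List Int)) (nn m : Nat) (ii : Int) :
    pvIncTile (field.map (fun r => brow r nn m ii)) = field.map (fun r => brow r nn m (ii + 1)) := by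
  simp only [pvIncTile, List.map_map]
  exact List.map_congr_left (fun r _ => incRow_brow r nn m ii)

lemma tiles_inv (field : List (List Int)) (nn : Nat) (l : List Int) (c : Nat) :
    l.foldl (fun ts _ => ts ++ [pvIncTile (ts.getLast?.getD [])])
        ((List.range (c + 1)).map (fun t : Nat => field.map (fun r => seg r nn (t : Int))))
      = (List.range (l.length + (c + 1))).map (fun t : Nat => field.map (fun r => seg r nn (t : Int))) := by
  induction l generalizing c with
  | nil => simp
  | cons x xs ih =>
    simp only [List.foldl_cons]
    have hlast : (((List.range (c + 1)).map (fun t : Nat => field.map (fun r => seg r nn (t : Int)))).getLast?.getD [])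
        = field.map (fun r => seg r nn (c : Int)) := by
      rw [List.range_succ]
      simp
    rw [hlast, incTile_tile]
    have hc : (c : Int) + 1 = ((c + 1 : Nat) : Int) := by push_cast; ring
    rw [hc]
    have hstep : (List.range (c + 1)).map (fun t : Nat => field.map (fun r => seg r nn (t : Int))) ++
          [field.map (fun r => seg r nn ((c + 1 : Nat) : Int))]
        = (List.range (c + 1 + 1)).map (fun t : Nat => field.map (fun r => seg r nn (t : Int))) := by
      rw [List.range_succ (n := c + 1), List.map_append]
      simp
    rw [hstep, ih (c + 1)]
    have hlen : xs.length + (c + 1 + 1) = (x :: xs).length + (c + 1) := by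
      simp only [List.length_cons]; omega
    rw [hlen]

lemma band_inv (field : List (List Int)) (nn : Nat) (ks : List Nat) (h : List Int → List Int) :
    (ks.map (fun k : Nat => field.map (fun r => seg r nn (k : Int)))).foldl
        (fun band tile => List.zipWith (fun b r => b ++ r) band tile) (field.map h)
      = field.map (fun r => h r ++ ks.flatMap (fun k : Nat => seg r nn (k : Int))) := by
  induction ks generalizing h with
  | nil => simp
  | cons k ks ih =>
    simp only [List.map_cons, List.foldl_cons]
    have hz : List.zipWith (fun b r => b ++ r) (field.map h) (field.map (fun r => seg r nn (k : Int)))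
        = field.map (fun r => h r ++ seg r nn (k : Int)) := by
      rw [List.zipWith_map, List.zipWith_self]
    rw [hz, ih (fun r => h r ++ seg r nn (k : Int))]
    simp [List.append_assoc]

lemma out_inv (field : List (List Int)) (nn m : Nat) (l : List Int)
    (acc : List (List Int)) (ii : Int) :
    (l.foldl (fun (p : List (List Int) × List (List Int)) _ => (p.1 ++ p.2, pvIncTile p.2))
        (acc, field.map (fun r => brow r nn m ii))).1
      = acc ++ (List.range l.length).flatMap
          (fun d : Nat => field.map (fun r => brow r nn m (ii + (d : Int)))) := by
  induction l generalizing acc ii with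
  | nil => simp
  | cons x xs ih =>
    simp only [List.foldl_cons, incTile_band]
    rw [ih (acc ++ field.map (fun r => brow r nn m ii)) (ii + 1)]
    rw [List.append_assoc]
    congr 1
    simp only [List.length_cons]
    rw [List.range_succ_eq_map, List.flatMap_cons, List.flatMap_map]
    congr 1
    . simp
    . refine List.flatMap_congr (fun d _ => ?_)
      refine congrArg (fun w => List.map (fun r => brow r nn m w) field) ?_
      push_cast
      ring

lemma B_eq_model (field : List (List Int)) (size : Int) :
    increase_field_alt field size = model field size.toNat := by
  unfold increase_field_alt
  simp only [PySem.List.len_eq]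
  rw [base_eq]
  have hinit : [field.map (fun r => seg r field.length 0)]
      = (List.range (0 + 1)).map (fun t : Nat => field.map (fun r => seg r field.length (t : Int))) := by
    simp
  rw [hinit, tiles_inv, PySem.List.length_pyRange_one]
  simp only [sub_zero]
  set m := (size - 1).toNat + 1 with hm
  rw [band_inv field field.length (List.range ((size - 1).toNat + 1)) (fun _ => [])]
  have hband : (fun (r : List Int) => ([] : List Int) ++ (List.range ((size - 1).toNat + 1)).flatMap
        (fun k : Nat => seg r field.length (k : Int)))
      = fun r => brow r field.length m 0 := by
    funext r
    rw [List.nil_append, brow]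
    exact List.flatMap_congr (fun t _ => by rw [zero_add])
  rw [hband, out_inv field field.length m (PySem.List.pyRange 0 size 1) [] 0,
    List.nil_append, PySem.List.length_pyRange_one]
  simp only [sub_zero, zero_add]
  by_cases hs : 1 ≤ size
  . have : m = size.toNat := by omega
    rw [this, model.eq_def]
  . have h0 : size.toNat = 0 := by omega
    rw [h0]
    simp [model]

-- ===== VERDICT (by name: the statement is the Claim_ definition above) =====
theorem increase_field_spec : Claim_equal_increase_field := by
  intro field size _hdom hpre
  unfold Spec_increase_field
  rw [B_eq_model]
  rcases hpre with hle | hrows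
  · have hs : size.toNat = 0 := by omega
    rw [hs]
    simp only [increase_field, model, List.range_zero, List.flatMap_nil]
    rw [PySem.List.pyRange_one_eq_nil hle]
    simp
  · rw [A_eq_model field size hrows]
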